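-- pv_equiv track=rewrite | github.com/NamiLiy/Helios_scalable_QEC | build_scripts/partitionScheme.py | incI
-- ===== SOURCE A (Python) =====
-- def incI(grid, p):
--     x = 0
--     ret = []
--     for j in range(len(grid)):
--         for i in range(len(grid[0])):
--             if(grid[j][i] == p):
--                 if(i+1 < len(grid[0]) and grid[j][i+1] == p):
--                     ret.append([x,x+1])
--                 else:
--                     m = 0
--                     for z in range(i+1):
--                         if(grid[j][i-z] == p):
--                             m = m + 1
--                     # m counts itself so add 1
--                     ret.append([x,x-m+1])
--                 x = x + 1
--     return ret
-- ===== SOURCE B (Python) =====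
-- def incI(grid, p):
--     # Closed form for A's backward scan: at the end of each run of p-cells the
--     # pair is [x, x0] where x0 is the match counter at the start of the row (the
--     # backward scan m always equals x - x0 + 1). So collect the row's p-columns
--     # once and emit pairs directly, no inner rescan and no running counter.
--     if not grid:
--         return []
--     w = len(grid[0])
--     ret = []
--     x = 0
--     for row in grid:
--         x0 = x
--         for i in [i for i in range(w) if row[i] == p]:
--             ret.append([x, x + 1] if i + 1 < w and row[i + 1] == p else [x, x0])
--             x += 1
--     return ret
-- ===== Notes on version B (the rewrite author's own statement) =====
-- stated objective: alternative
-- what changed: Replaces A's backward rescan at every run end with the closed form [x, x0] (x0 = match counter at the start of the row, provably equal to x-m+1), emitting pairs in one pass over the row's precomputed p-columns; O(rows*width) vs A's worst-case O(rows*width^2), though a timing run did not confirm a 1.5x speed-up on its inputs.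
import Mathlib
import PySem

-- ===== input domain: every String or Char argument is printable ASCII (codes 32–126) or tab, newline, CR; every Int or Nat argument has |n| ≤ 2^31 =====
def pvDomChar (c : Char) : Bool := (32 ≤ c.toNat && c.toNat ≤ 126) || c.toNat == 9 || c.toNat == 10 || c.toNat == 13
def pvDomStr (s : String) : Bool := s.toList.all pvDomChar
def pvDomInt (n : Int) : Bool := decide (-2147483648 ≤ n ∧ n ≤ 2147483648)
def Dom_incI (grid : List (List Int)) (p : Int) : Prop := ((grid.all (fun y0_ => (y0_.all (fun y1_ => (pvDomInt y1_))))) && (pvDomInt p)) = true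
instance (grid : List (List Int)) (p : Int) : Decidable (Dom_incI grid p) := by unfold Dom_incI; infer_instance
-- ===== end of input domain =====

-- B replaces A's backward rescan at each run end with the closed form [x, x0]
-- (x0 = match counter at row start), emitting pairs from the row's p-columns.

-- ===== PORT A =====
-- the inner z-loop of A: m = 0; for z in range(i+1): if grid[j][i-z] == p: m += 1
def aM (row : List Int) (p : Int) (i : Nat) : Int :=
  (PySem.List.pyRange 0 ((i : Int) + 1) 1).foldl
    (fun m z => if PySem.List.pyGet? row ((i : Int) - z) = some p then m + 1 else m) 0

-- A's column loop 'for i in range(w)' as recursion on the number of remaining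
-- iterations (fuel = w - i), threading (x, ret) exactly as A does
def aCols (row : List Int) (p : Int) (w : Nat) : Nat → Nat → Int → List (List Int) → Int × List (List Int)
  | 0, _, x, ret => (x, ret)
  | fuel + 1, i, x, ret =>
    if PySem.List.pyGet? row (i : Int) = some p then
      if i + 1 < w ∧ PySem.List.pyGet? row ((i : Int) + 1) = some p then
        aCols row p w fuel (i + 1) (x + 1) (ret ++ [[x, x + 1]])
      else
        aCols row p w fuel (i + 1) (x + 1) (ret ++ [[x, x - aM row p i + 1]])
    else aCols row p w fuel (i + 1) x ret

def incI (grid : List (List Int)) (p : Int) : List (List Int) :=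
  (grid.foldl
    (fun (st : Int × List (List Int)) row =>
      aCols row p (PySem.List.pyGetD grid 0 []).length (PySem.List.pyGetD grid 0 []).length 0 st.1 st.2)
    ((0 : Int), ([] : List (List Int)))).2

-- ===== PORT B =====
-- one emitted pair per p-column i of the row: [x, x+1] if the next cell is p too,
-- else the closed form [x, x0]
def bStep (row : List Int) (p : Int) (w : Nat) (x0 : Int)
    (st : Int × List (List Int)) (i : Nat) : Int × List (List Int) :=
  (st.1 + 1,
   st.2 ++ [if decide (i + 1 < w) && (PySem.List.pyGet? row ((i : Int) + 1) == some p)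
            then [st.1, st.1 + 1] else [st.1, x0]])

def incI_alt (grid : List (List Int)) (p : Int) : List (List Int) :=
  match grid with
  | [] => []
  | g :: _ =>
    (grid.foldl
      (fun (st : Int × List (List Int)) row =>
        ((List.range g.length).filter
            (fun (i : Nat) => PySem.List.pyGet? row ((i : Nat) : Int) == some p)).foldl
          (bStep row p g.length st.1) st)
      ((0 : Int), ([] : List (List Int)))).2

-- ===== PRECONDITION & SPEC =====
-- Pre_ excludes exactly the inputs where Python A raises IndexError: a (nonempty)
-- grid containing a row shorter than its first row (grid[j][i] fails there).
def Pre_incI (grid : List (List Int)) (_p : Int) : Prop :=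
  ∀ row ∈ grid, (PySem.List.pyGetD grid 0 []).length ≤ row.length
instance (grid : List (List Int)) (p : Int) : Decidable (Pre_incI grid p) := by
  unfold Pre_incI; infer_instance

def pvWitness_incI : List (List Int) × Int := ([[1, 2], [1, 1]], 1)

def Spec_incI (grid : List (List Int)) (p : Int) (out : List (List Int)) : Prop := out = incI_alt grid p
instance (grid : List (List Int)) (p : Int) (out : List (List Int)) : Decidable (Spec_incI grid p out) := by unfold Spec_incI; infer_instance

-- ===== CLAIM (what is proved, stated in full; the proofs are below) =====
def Claim_equal_incI : Prop := ∀ (grid : List (List Int)) (p : Int), Dom_incI grid p → Pre_incI grid p → Spec_incI grid p (incI grid p)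

-- ===== LEMMAS AND PROOFS =====

-- number of p-cells among row[0..n-1] (as the ports see them, via pyGet?)
def countPre (row : List Int) (p : Int) : Nat → Int
  | 0 => 0
  | n + 1 => countPre row p n + (if PySem.List.pyGet? row ((n : Int)) = some p then 1 else 0)

theorem aM_eq (row : List Int) (p : Int) (i : Nat) :
    aM row p i = countPre row p (i + 1) := by
  have key : ∀ n : Nat, n ≤ i + 1 →
      ((PySem.List.pyRange 0 (n : Int) 1).foldl
        (fun m z => if PySem.List.pyGet? row ((i : Int) - z) = some p then m + 1 else m) 0)
        + countPre row p (i + 1 - n) = countPre row p (i + 1) := by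
    intro n
    induction n with
    | zero =>
      intro _
      rw [PySem.List.pyRange_one_eq_nil (by omega)]
      simp
    | succ n ih =>
      intro h
      have hcast : ((n + 1 : Nat) : Int) = (n : Int) + 1 := by push_cast; ring
      rw [hcast, PySem.List.pyRange_one_succ_right (by omega), List.foldl_append]
      simp only [List.foldl_cons, List.foldl_nil]
      have hin : (i : Int) - (n : Int) = ((i - n : Nat) : Int) := by omega
      have hsub : i + 1 - n = (i - n) + 1 := by omega
      have hsub2 : i + 1 - (n + 1) = i - n := by omega
      have ihn := ih (by omega)
      rw [hsub] at ihn
      rw [hin, hsub2]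
      simp only [countPre] at ihn ⊢
      by_cases hc : PySem.List.pyGet? row ((i - n : Nat) : Int) = some p
      · simp only [hc, if_true] at ihn ⊢
        omega
      · simp only [hc, if_false] at ihn ⊢
        omega
  have := key (i + 1) (le_refl _)
  rw [show ((i + 1 : Nat) : Int) = (i : Int) + 1 by push_cast; ring] at this
  simp only [Nat.sub_self] at this
  rw [show countPre row p 0 = 0 from rfl, add_zero] at this
  unfold aM
  exact this

-- the heart: A's column recursion starting at column i with x = x0 + countPre i
-- equals B's fold of bStep over the p-columns in [i, i+fuel)
theorem aCols_eq_bFold (row : List Int) (p : Int) (w : Nat) (x0 : Int) :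
    ∀ (fuel i : Nat) (ret : List (List Int)),
      aCols row p w fuel i (x0 + countPre row p i) ret
        = ((List.range' i fuel).filter
            (fun (i : Nat) => PySem.List.pyGet? row ((i : Nat) : Int) == some p)).foldl
            (bStep row p w x0) (x0 + countPre row p i, ret) := by
  intro fuel
  induction fuel with
  | zero => intro i ret; rfl
  | succ fuel ih =>
    intro i ret
    rw [List.range'_succ]
    simp only [aCols, List.filter_cons]
    by_cases hp : PySem.List.pyGet? row (i : Int) = some p
    · have hC : countPre row p (i + 1) = countPre row p i + 1 := by
        simp only [countPre]; rw [if_pos hp]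
      rw [if_pos hp, if_pos (show (PySem.List.pyGet? row ((i : Nat) : Int) == some p) = true from beq_iff_eq.mpr hp)]
      simp only [List.foldl_cons]
      have hstep : ∀ ret', aCols row p w fuel (i + 1) (x0 + countPre row p i + 1) ret'
          = ((List.range' (i+1) fuel).filter
              (fun (i : Nat) => PySem.List.pyGet? row ((i : Nat) : Int) == some p)).foldl
              (bStep row p w x0) (x0 + countPre row p i + 1, ret') := by
        intro ret'
        have := ih (i + 1) ret'
        rw [hC] at this
        rw [show x0 + (countPre row p i + 1) = x0 + countPre row p i + 1 by ring] at this
        exact this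
      by_cases ha : i + 1 < w ∧ PySem.List.pyGet? row ((i : Int) + 1) = some p
      · rw [if_pos ha]
        rw [hstep]
        congr 1
        simp only [bStep]
        rw [if_pos (by simp [ha.1, ha.2])]
      · rw [if_neg ha]
        have hm : x0 + countPre row p i - aM row p i + 1 = x0 := by
          rw [aM_eq, hC]; ring
        rw [hm, hstep]
        congr 1
        simp only [bStep]
        rw [if_neg (by
          simp only [Bool.and_eq_true, decide_eq_true_eq, beq_iff_eq]
          exact ha)]
    · have hC : countPre row p (i + 1) = countPre row p i := by
        simp only [countPre]; rw [if_neg hp]; ring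
      rw [if_neg hp, if_neg (show ¬((PySem.List.pyGet? row ((i : Nat) : Int) == some p) = true) from by simp only [beq_iff_eq]; exact hp)]
      have := ih (i + 1) ret
      rw [hC] at this
      exact this

-- per-row equality, at i = 0 (x0 := the incoming state's counter)
theorem row_eq (row : List Int) (p : Int) (w : Nat) (st : Int × List (List Int)) :
    aCols row p w w 0 st.1 st.2
      = ((List.range w).filter
          (fun (i : Nat) => PySem.List.pyGet? row ((i : Nat) : Int) == some p)).foldl
          (bStep row p w st.1) st := by
  have := aCols_eq_bFold row p w st.1 w 0 st.2
  simp only [show countPre row p 0 = 0 from rfl, add_zero] at this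
  rw [List.range_eq_range']
  exact this

theorem rows_eq (p : Int) (w : Nat) (l : List (List Int)) :
    ∀ (st : Int × List (List Int)),
      l.foldl (fun st row => aCols row p w w 0 st.1 st.2) st
        = l.foldl (fun (st : Int × List (List Int)) row =>
            ((List.range w).filter
                (fun (i : Nat) => PySem.List.pyGet? row ((i : Nat) : Int) == some p)).foldl
              (bStep row p w st.1) st) st := by
  induction l with
  | nil => intro st; rfl
  | cons r rs ih =>
    intro st
    simp only [List.foldl_cons]
    rw [row_eq]
    exact ih _

-- ===== VERDICT (by name: the statement is the Claim_ definition above) =====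
theorem incI_spec : Claim_equal_incI := by
  intro grid p _ _
  unfold Spec_incI incI incI_alt
  cases grid with
  | nil => rfl
  | cons g gs =>
    have hw : (PySem.List.pyGetD (g :: gs) 0 []).length = g.length := by
      simp [PySem.List.pyGetD, PySem.List.pyGet?, PySem.List.pyIdx?]
    rw [hw, rows_eq]
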